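-- pv_equiv track=rewrite | github.com/Alvarowned/Tercero-GII | Segundo Semestre/Algoritmia y Complejidad/Tema5/T5_E6.py | sustitucionesAux
-- ===== SOURCE A (Python) =====
-- cadena = "acabada"
--
-- tablaSustitucion = [["b","b","a","d"],
--                     ["c","a","d","a"],
--                     ["b","a","c","c"],
--                     ["d","c","d","b"]]
--
-- indice = ["a", "b", "c", "d"]
--
-- def sustitucionesAux(indice, tablaSustitucion, cadena, carFin, progreso):
--     if(len(cadena) == 1):
--         if(cadena == carFin):
--             return [progreso]
--         else:
--             return []
--     else:
--         resultados = []
--         for i in range(0, len(cadena)-1):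
--             index1, index2 = indice.index(cadena[i]), indice.index(cadena[i+1])
--             cadenaAux = cadena[:i] + tablaSustitucion[index1][index2] + cadena[i+2:]
--             sol = sustitucionesAux(indice, tablaSustitucion, cadenaAux, carFin, progreso + [cadenaAux])
--             if(sol != []):
--                 resultados += sol
--         return resultados
-- ===== SOURCE B (Python) =====
-- def sustitucionesAux(indice, tablaSustitucion, cadena, carFin, progreso):
--     # Iterative DFS with an explicit stack instead of recursion; same return value.
--     resultados = []
--     stack = [(cadena, progreso)]
--     while stack:
--         s, prog = stack.pop()
--         if len(s) == 1:
--             if s == carFin: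
--                 resultados.append(prog)
--         else:
--             hijos = []
--             for i in range(len(s) - 1):
--                 k1, k2 = indice.index(s[i]), indice.index(s[i + 1])
--                 ns = s[:i] + tablaSustitucion[k1][k2] + s[i + 2:]
--                 hijos.append((ns, prog + [ns]))
--             stack.extend(reversed(hijos))
--     return resultados
-- ===== Notes on version B (the rewrite author's own statement) =====
-- stated objective: alternative
-- what changed: The recursive enumeration of substitution paths is replaced by an iterative depth-first search over an explicit stack of (string, path) states, with children pushed in reverse index order so paths come out in the same order.
-- outside the precondition, e.g. on sustitucionesAux(['a'], [['']], 'aa', 'a', []): A returns [], B returns []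
import Mathlib
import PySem

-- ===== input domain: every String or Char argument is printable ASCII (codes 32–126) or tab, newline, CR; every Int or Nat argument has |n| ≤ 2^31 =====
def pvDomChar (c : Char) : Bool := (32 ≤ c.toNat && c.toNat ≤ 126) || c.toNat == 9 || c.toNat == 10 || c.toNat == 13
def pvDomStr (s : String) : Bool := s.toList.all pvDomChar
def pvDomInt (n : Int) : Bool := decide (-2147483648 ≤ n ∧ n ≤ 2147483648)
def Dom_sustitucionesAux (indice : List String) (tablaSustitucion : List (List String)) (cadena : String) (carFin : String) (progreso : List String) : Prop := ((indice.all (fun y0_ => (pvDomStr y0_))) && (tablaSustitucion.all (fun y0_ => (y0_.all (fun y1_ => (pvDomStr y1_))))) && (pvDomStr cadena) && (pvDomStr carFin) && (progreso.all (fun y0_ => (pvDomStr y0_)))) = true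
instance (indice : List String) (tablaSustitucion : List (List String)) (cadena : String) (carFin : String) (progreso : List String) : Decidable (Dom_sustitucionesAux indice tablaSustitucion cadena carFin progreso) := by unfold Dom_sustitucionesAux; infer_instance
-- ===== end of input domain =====

-- B replaces A's recursive enumeration by an iterative DFS over an explicit stack (same return value; 'alternative', not faster).

-- Shared by both ports: one substitution step cadena[:i] + tablaSustitucion[k1][k2] + cadena[i+2:]
-- (none exactly where Python raises ValueError from .index or IndexError from the table lookup).
def pvChild (indice : List String) (tablaSustitucion : List (List String)) (s : List Char) (i : Nat) : Option (List Char) :=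
  match s[i]?, s[i+1]? with
  | some c1, some c2 =>
    match PySem.List.index? indice (String.ofList [c1]), PySem.List.index? indice (String.ofList [c2]) with
    | some k1, some k2 =>
      match PySem.List.pyGet? tablaSustitucion (k1 : Int) with
      | some row =>
        match PySem.List.pyGet? row (k2 : Int) with
        | some e => some (s.take i ++ e.toList ++ s.drop (i+2))
        | none => none
      | none => none
    | _, _ => none
  | _, _ => none

-- ===== PORT A =====
-- A's recursion, on cadena.toList; fuel = |cadena| is only a totality guard (each recursive call
-- shortens cadena by exactly one inside Pre_, so fuel never runs out there).
def pvSusA (indice : List String) (tablaSustitucion : List (List String)) (carFin : List Char) : Nat → List Char → List String → List (List String)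
  | fuel, s, progreso =>
    if s.length = 1 then
      (if s = carFin then [progreso] else [])
    else
      match fuel with
      | 0 => []
      | f + 1 =>
        (List.range (s.length - 1)).foldl
          (fun resultados i =>
            match pvChild indice tablaSustitucion s i with
            | some ns =>
              let sol := pvSusA indice tablaSustitucion carFin f ns (progreso ++ [String.ofList ns])
              if sol = [] then resultados else resultados ++ sol
            | none => resultados)   -- Python raises here; excluded by Pre_
          []

def sustitucionesAux (indice : List String) (tablaSustitucion : List (List String)) (cadena : String) (carFin : String) (progreso : List String) : List (List String) :=
  pvSusA indice tablaSustitucion carFin.toList cadena.toList.length cadena.toList progreso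

-- ===== PORT B =====
-- the children of a popped state, pushed in reverse order in Source B = popped left to right
def pvChildren (indice : List String) (tablaSustitucion : List (List String)) (s : List Char) (prog : List String) : List (List Char × List String) :=
  (List.range (s.length - 1)).filterMap
    (fun i => (pvChild indice tablaSustitucion s i).map (fun ns => (ns, prog ++ [String.ofList ns])))

-- numeric fuel: an upper bound on the number of stack pops (totality guard only)
def pvNodes : Nat → Nat
  | 0 => 1
  | 1 => 1
  | n + 2 => 1 + (n + 1) * pvNodes (n + 1)

-- the while-stack loop of Source B; head of the list = top of the stack
def pvDfs (indice : List String) (tablaSustitucion : List (List String)) (carFin : List Char) : Nat → List (List Char × List String) → List (List String)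
  | _, [] => []
  | 0, _ :: _ => []
  | f + 1, (s, p) :: rest =>
    if s.length = 1 then
      (if s = carFin then [p] else []) ++ pvDfs indice tablaSustitucion carFin f rest
    else
      pvDfs indice tablaSustitucion carFin f (pvChildren indice tablaSustitucion s p ++ rest)

def sustitucionesAux_alt (indice : List String) (tablaSustitucion : List (List String)) (cadena : String) (carFin : String) (progreso : List String) : List (List String) :=
  pvDfs indice tablaSustitucion carFin.toList (pvNodes cadena.toList.length) [(cadena.toList, progreso)]

-- ===== PRECONDITION & SPEC =====
-- Pre_ excludes inputs with len(cadena) ≥ 2 on which A's character lookups would raise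
-- ValueError/IndexError, or on which some substitution entry is not a single alphabet character
-- (there A's recursion changes the string length arbitrarily and in general does not terminate).
def Pre_sustitucionesAux (indice : List String) (tablaSustitucion : List (List String)) (cadena : String) (carFin : String) (progreso : List String) : Prop :=
  cadena.toList.length ≤ 1 ∨
  ( cadena.toList.all (fun c => decide (String.ofList [c] ∈ indice)) = true
    ∧ indice.length ≤ tablaSustitucion.length
    ∧ (tablaSustitucion.take indice.length).all
        (fun row => decide (indice.length ≤ row.length) &&
          (row.take indice.length).all
            (fun e => decide (e.toList.length = 1) && decide (e ∈ indice))) = true )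
instance (indice : List String) (tablaSustitucion : List (List String)) (cadena : String) (carFin : String) (progreso : List String) : Decidable (Pre_sustitucionesAux indice tablaSustitucion cadena carFin progreso) := by unfold Pre_sustitucionesAux; infer_instance

def pvWitness_sustitucionesAux : List String × List (List String) × String × String × List String :=
  (["a", "b"], [["b", "b"], ["a", "a"]], "ab", "b", [])

def Spec_sustitucionesAux (indice : List String) (tablaSustitucion : List (List String)) (cadena : String) (carFin : String) (progreso : List String) (out : List (List String)) : Prop := out = sustitucionesAux_alt indice tablaSustitucion cadena carFin progreso
instance (indice : List String) (tablaSustitucion : List (List String)) (cadena : String) (carFin : String) (progreso : List String) (out : List (List String)) : Decidable (Spec_sustitucionesAux indice tablaSustitucion cadena carFin progreso out) := by unfold Spec_sustitucionesAux; infer_instance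

-- ===== CLAIM (what is proved, stated in full; the proofs are below) =====
def Claim_equal_sustitucionesAux : Prop := ∀ (indice : List String) (tablaSustitucion : List (List String)) (cadena : String) (carFin : String) (progreso : List String), Dom_sustitucionesAux indice tablaSustitucion cadena carFin progreso → Pre_sustitucionesAux indice tablaSustitucion cadena carFin progreso → Spec_sustitucionesAux indice tablaSustitucion cadena carFin progreso (sustitucionesAux indice tablaSustitucion cadena carFin progreso)

-- ===== LEMMAS AND PROOFS =====

-- the closure conditions on the alphabet and the table (the second disjunct of Pre_, without cadena)
def pvConds (indice : List String) (tablaSustitucion : List (List String)) : Prop :=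
  indice.length ≤ tablaSustitucion.length
  ∧ (tablaSustitucion.take indice.length).all
      (fun row => decide (indice.length ≤ row.length) &&
        (row.take indice.length).all
          (fun e => decide (e.toList.length = 1) && decide (e ∈ indice))) = true

-- all characters of s name alphabet symbols
def pvGood (indice : List String) (s : List Char) : Prop :=
  ∀ c ∈ s, String.ofList [c] ∈ indice

lemma pvNodes_pos (n : Nat) : 1 ≤ pvNodes n := by
  match n with
  | 0 => simp [pvNodes]
  | 1 => simp [pvNodes]
  | n + 2 => simp [pvNodes]

lemma pvIndex (indice : List String) (v : String) (h : v ∈ indice) :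
    ∃ k, PySem.List.index? indice v = some k ∧ k < indice.length := by
  have h2 := (PySem.List.index?_isSome_iff indice v).mpr h
  rcases Option.isSome_iff_exists.mp h2 with ⟨k, hk⟩
  obtain ⟨hlt, -, -⟩ := PySem.List.getElem_of_index?_eq_some hk
  exact ⟨k, hk, hlt⟩

lemma pvChild_spec (indice : List String) (tablaSustitucion : List (List String))
    (hc : pvConds indice tablaSustitucion) (s : List Char) (hg : pvGood indice s)
    (i : Nat) (hi : i + 1 < s.length) :
    ∃ ns, pvChild indice tablaSustitucion s i = some ns ∧ ns.length + 1 = s.length ∧ pvGood indice ns := by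
  obtain ⟨hlen, htab⟩ := hc
  have hi0 : i < s.length := by omega
  have hget1 : s[i]? = some s[i] := by simp [hi0]
  have hget2 : s[i+1]? = some s[i+1] := by simp [hi]
  obtain ⟨k1, hk1, hk1lt⟩ := pvIndex indice _ (hg s[i] (by simp [List.getElem_mem]))
  obtain ⟨k2, hk2, hk2lt⟩ := pvIndex indice _ (hg s[i+1] (by simp [List.getElem_mem]))
  have hk1t : k1 < tablaSustitucion.length := lt_of_lt_of_le hk1lt hlen
  have hrow : PySem.List.pyGet? tablaSustitucion (k1 : Int) = some tablaSustitucion[k1] := by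
    simp [hk1t]
  -- row conditions from htab
  have hmem : tablaSustitucion[k1] ∈ tablaSustitucion.take indice.length := by
    have : (tablaSustitucion.take indice.length)[k1]'(by simp; omega) = tablaSustitucion[k1] := by
      simp [List.getElem_take]
    rw [← this]; exact List.getElem_mem _
  have hrowc := List.all_eq_true.mp htab _ hmem
  simp only [Bool.and_eq_true, decide_eq_true_eq] at hrowc
  obtain ⟨hrlen, hrall⟩ := hrowc
  have hk2r : k2 < (tablaSustitucion[k1]).length := lt_of_lt_of_le hk2lt hrlen
  have he : PySem.List.pyGet? tablaSustitucion[k1] (k2 : Int) = some (tablaSustitucion[k1])[k2] := by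
    simp [hk2r]
  set e := (tablaSustitucion[k1])[k2] with hedef
  have hemem : e ∈ (tablaSustitucion[k1]).take indice.length := by
    have : ((tablaSustitucion[k1]).take indice.length)[k2]'(by simp; omega) = e := by
      simp [List.getElem_take, hedef]
    rw [← this]; exact List.getElem_mem _
  have hec := List.all_eq_true.mp hrall _ hemem
  simp only [Bool.and_eq_true, decide_eq_true_eq] at hec
  obtain ⟨helen, hein⟩ := hec
  refine ⟨s.take i ++ e.toList ++ s.drop (i+2), ?_, ?_, ?_⟩
  · simp only [pvChild, hget1, hget2, hk1, hk2, hrow, he]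
  · simp [helen]; omega
  · intro c hcm
    simp only [List.mem_append] at hcm
    rcases hcm with (hcm | hcm) | hcm
    · exact hg c (List.mem_of_mem_take hcm)
    · -- c is e's only character
      obtain ⟨c0, hc0⟩ : ∃ c0, e.toList = [c0] := List.length_eq_one_iff.mp helen
      have : c = c0 := by rw [hc0] at hcm; simpa using hcm
      subst this
      have : String.ofList [c] = e := by rw [← hc0]; exact String.ofList_toList
      rwa [this]
    · exact hg c (List.mem_of_mem_drop hcm)

lemma pvSusA_len1 (indice : List String) (tablaSustitucion : List (List String)) (carFin : List Char)
    (fuel : Nat) (s : List Char) (p : List String) (h1 : s.length = 1) :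
    pvSusA indice tablaSustitucion carFin fuel s p = if s = carFin then [p] else [] := by
  rw [pvSusA.eq_def]
  dsimp only
  rw [if_pos h1]

lemma pvSusA_zero (indice : List String) (tablaSustitucion : List (List String)) (carFin : List Char)
    (s : List Char) (p : List String) (h1 : s.length ≠ 1) :
    pvSusA indice tablaSustitucion carFin 0 s p = [] := by
  rw [pvSusA.eq_def]
  dsimp only
  rw [if_neg h1]

lemma pvChildren_eq (indice : List String) (tablaSustitucion : List (List String))
    (hc : pvConds indice tablaSustitucion) (s : List Char) (p : List String) (hg : pvGood indice s) :
    pvChildren indice tablaSustitucion s p =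
      (List.range (s.length - 1)).map
        (fun i => (((pvChild indice tablaSustitucion s i).getD []),
                   p ++ [String.ofList ((pvChild indice tablaSustitucion s i).getD [])])) := by
  unfold pvChildren
  rw [List.filterMap_eq_map_iff_forall_eq_some.mpr]
  intro i hi
  have hi' : i + 1 < s.length := by
    have := List.mem_range.mp hi; omega
  obtain ⟨ns, hns, -, -⟩ := pvChild_spec indice tablaSustitucion hc s hg i hi'
  simp [hns]

lemma pvSusA_fold (indice : List String) (tablaSustitucion : List (List String)) (carFin : List Char)
    (f : Nat) (s : List Char) (progreso : List String) (hne : s.length ≠ 1) :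
    pvSusA indice tablaSustitucion carFin (f + 1) s progreso =
      (List.range (s.length - 1)).flatMap
        (fun i => match pvChild indice tablaSustitucion s i with
          | some ns => pvSusA indice tablaSustitucion carFin f ns (progreso ++ [String.ofList ns])
          | none => []) := by
  conv_lhs => rw [pvSusA]
  rw [if_neg hne]
  have hstep : (fun (resultados : List (List String)) (i : Nat) =>
      match pvChild indice tablaSustitucion s i with
      | some ns =>
        let sol := pvSusA indice tablaSustitucion carFin f ns (progreso ++ [String.ofList ns])
        if sol = [] then resultados else resultados ++ sol
      | none => resultados) =
      (fun resultados i => resultados ++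
        (match pvChild indice tablaSustitucion s i with
          | some ns => pvSusA indice tablaSustitucion carFin f ns (progreso ++ [String.ofList ns])
          | none => [])) := by
    funext resultados i
    cases hch : pvChild indice tablaSustitucion s i with
    | none => simp
    | some ns =>
      simp only []
      split <;> simp_all
  rw [hstep, PySem.List.foldl_append_eq_flatMap]
  simp

lemma pvDfs_eq (indice : List String) (tablaSustitucion : List (List String)) (carFin : List Char)
    (hc : pvConds indice tablaSustitucion) :
    ∀ (fuel : Nat) (stack : List (List Char × List String)),
      (∀ e ∈ stack, pvGood indice e.1) →
      (stack.map (fun e => pvNodes e.1.length)).sum ≤ fuel →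
      pvDfs indice tablaSustitucion carFin fuel stack =
        stack.flatMap (fun e => pvSusA indice tablaSustitucion carFin e.1.length e.1 e.2) := by
  intro fuel
  induction fuel with
  | zero =>
    intro stack hg hsum
    cases stack with
    | nil => simp [pvDfs]
    | cons e rest =>
      exfalso
      have := pvNodes_pos e.1.length
      simp [List.map_cons] at hsum
      omega
  | succ f ih =>
    intro stack hg hsum
    cases stack with
    | nil => simp [pvDfs]
    | cons e rest =>
      obtain ⟨s, p⟩ := e
      by_cases h1 : s.length = 1
      · rw [pvDfs, if_pos h1]
        rw [ih rest (fun e he => hg e (List.mem_cons_of_mem _ he))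
          (by simp at hsum ⊢; have := pvNodes_pos s.length; omega)]
        conv_rhs => rw [List.flatMap_cons]
        congr 1
        rw [pvSusA_len1 _ _ _ _ _ _ h1]
      · rw [pvDfs, if_neg h1]
        have hgs : pvGood indice s := hg _ (List.mem_cons_self)
        -- children facts
        have hch := pvChildren_eq indice tablaSustitucion hc s p hgs
        have hchild : ∀ i ∈ List.range (s.length - 1),
            ∃ ns, pvChild indice tablaSustitucion s i = some ns ∧ ns.length + 1 = s.length ∧ pvGood indice ns := by
          intro i hi
          exact pvChild_spec indice tablaSustitucion hc s hgs i (by have := List.mem_range.mp hi; omega)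
        have hgood' : ∀ e ∈ pvChildren indice tablaSustitucion s p ++ rest, pvGood indice e.1 := by
          intro e he
          rcases List.mem_append.mp he with he | he
          · rw [hch] at he
            obtain ⟨i, hi, rfl⟩ := List.mem_map.mp he
            obtain ⟨ns, hns, -, hgns⟩ := hchild i hi
            simpa [hns] using hgns
          · exact hg e (List.mem_cons_of_mem _ he)
        have hsum' : ((pvChildren indice tablaSustitucion s p ++ rest).map (fun e => pvNodes e.1.length)).sum ≤ f := by
          have hlen : ∀ e ∈ pvChildren indice tablaSustitucion s p, pvNodes e.1.length = pvNodes (s.length - 1) := by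
            intro e he
            rw [hch] at he
            obtain ⟨i, hi, rfl⟩ := List.mem_map.mp he
            obtain ⟨ns, hns, hlen, -⟩ := hchild i hi
            simp [hns]
            congr 1
            omega
          have hclen : (pvChildren indice tablaSustitucion s p).length = s.length - 1 := by
            rw [hch]; simp
          have : ((pvChildren indice tablaSustitucion s p).map (fun e => pvNodes e.1.length)).sum
              = (s.length - 1) * pvNodes (s.length - 1) := by
            rw [List.sum_eq_card_nsmul _ _ (by
              intro x hx
              obtain ⟨e, he, rfl⟩ := List.mem_map.mp hx
              exact hlen e he)]
            simp [hclen]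
          simp only [List.map_append, List.sum_append, this]
          have hsum2 : pvNodes s.length + (rest.map (fun e => pvNodes e.1.length)).sum ≤ f + 1 := by
            simpa using hsum
          have hnodes : pvNodes s.length = 1 + (s.length - 1) * pvNodes (s.length - 1) ∨ s.length = 0 := by
            match hs : s.length with
            | 0 => right; rfl
            | 1 => exact absurd hs h1
            | n + 2 => left; simp [pvNodes]
          rcases hnodes with hnodes | hnodes
          · omega
          · simp [hnodes, pvNodes] at hsum2 ⊢
            omega
        rw [ih _ hgood' hsum']
        rw [List.flatMap_append]
        conv_rhs => rw [List.flatMap_cons]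
        congr 1
        -- head: flatMap over children = A's value on (s, p)
        match hf : s.length, h1 with
        | 0, _ =>
          have hsnil : s = [] := List.length_eq_zero_iff.mp hf
          subst hsnil
          rw [pvSusA_zero _ _ _ _ _ (by simp)]
          simp [pvChildren]
        | n + 2, _ =>
          have hlen2 : s.length = n + 2 := hf
          rw [show pvSusA indice tablaSustitucion carFin (n+2) s p
              = pvSusA indice tablaSustitucion carFin ((n+1) + 1) s p by rfl]
          rw [pvSusA_fold indice tablaSustitucion carFin (n+1) s p (by omega)]
          rw [hch, List.flatMap_map, hlen2]
          simp only [List.flatMap_def]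
          congr 1
          apply List.map_congr_left
          intro i hi
          have hin : i < n + 1 := by simpa using List.mem_range.mp hi
          obtain ⟨ns, hns, hlenns, -⟩ := hchild i (List.mem_range.mpr (by omega))
          simp only [hns, Option.getD_some]
          congr 1
          omega

-- ===== VERDICT (by name: the statement is the Claim_ definition above) =====
theorem sustitucionesAux_spec : Claim_equal_sustitucionesAux := by
  intro indice tablaSustitucion cadena carFin progreso _hdom hpre
  unfold Spec_sustitucionesAux sustitucionesAux sustitucionesAux_alt
  rcases hpre with hle | ⟨hgood, hlen, htab⟩
  · -- len(cadena) ≤ 1 : both sides computed directly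
    match hm : cadena.toList with
    | [] =>
      simp only [List.length_nil]
      rw [pvSusA_zero _ _ _ _ _ (by simp)]
      simp [pvNodes, pvDfs, pvChildren]
    | [c] =>
      simp only [List.length_cons, List.length_nil]
      rw [pvSusA_len1 _ _ _ _ _ _ (by simp)]
      simp [pvNodes, pvDfs]
    | c1 :: c2 :: rest =>
      exfalso
      rw [hm] at hle
      simp at hle
  · -- closure case: the DFS invariant with the singleton stack
    rw [pvDfs_eq indice tablaSustitucion carFin.toList ⟨hlen, htab⟩ _ _
      (by
        intro e he
        simp only [List.mem_singleton] at he
        subst he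
        intro c hc
        exact of_decide_eq_true (List.all_eq_true.mp hgood c hc))
      (by simp)]
    simp
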